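-- pv_equiv track=rewrite | github.com/Suchithra-Vengalil/Python-Projects | Assignment4.py | estimateClass
-- ===== SOURCE A (Python) =====
-- def estimateClass(courseNumber,data_dict,class_dict,prereq_dict):
--     ''' This function will be used to find a list of eligible students for a given class
--         courseNumber- Will ask the user for a course number and the program will output the number of eligible students for that course
--         data_dict - A consolidated dictionary of all courses from all programs
--         class_dict -A list of students enrolled in a class with courseNumber as key
--         prereq_dict-Earlier created dictionary of all the prerequisite courses
--     Returns:
--         A sorted list of students who would be eligible to take the course, specified by the parameter,
--         in the next semester
--     '''
--     eligibleStudentsdtList=set()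
--
--     if courseNumber in data_dict.keys():
--         #creating a consolidated student list
--         for studentName in class_dict.values():
--             eligibleStudentsdtList = eligibleStudentsdtList.union(studentName)
--
--         #Finding the difference of students who have previously taken the course from the total list
--         eligibleStudentsdtList = eligibleStudentsdtList.difference(class_dict[courseNumber])
--
--         #check if the prerequisite course criterion is fulfilled and making the final list of eligible students
--
--         if courseNumber in prereq_dict.keys():
--             for prereq in prereq_dict[courseNumber]:
--                 eligibleStudentsdtList = eligibleStudentsdtList.intersection(class_dict[prereq])
--         sortedListEligible=sorted(eligibleStudentsdtList)
--
--         return list(sortedListEligible)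
--
--
--     else:
--         return list(set())
-- ===== SOURCE B (Python) =====
-- def estimateClass(courseNumber, data_dict, class_dict, prereq_dict):
--     if courseNumber not in data_dict:
--         return []
--     enrolled = class_dict[courseNumber]
--     prereqs = prereq_dict[courseNumber] if courseNumber in prereq_dict else []
--     rosters = [class_dict[p] for p in prereqs]
--     if rosters:
--         # any eligible student must be on the first prerequisite roster
--         base, rest = rosters[0], rosters[1:]
--     else:
--         base = [s for r in class_dict.values() for s in r]
--         rest = []
--     out = []
--     prev = None
--     for s in sorted(base):
--         if s != prev and s not in enrolled and all(s in r for r in rest):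
--             out.append(s)
--         prev = s
--     return out
-- ===== Notes on version B (the rewrite author's own statement) =====
-- stated objective: alternative
-- what changed: Instead of A's set pipeline (union of all rosters, set difference, iterated whole-set intersection, sorted), B uses no sets: it draws candidates from the first prerequisite roster alone (or the flattened enrollment lists when there are no prerequisites), sorts that raw list, and emits the result in one scan that deduplicates against the previous element and tests membership per student.
import Mathlib
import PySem

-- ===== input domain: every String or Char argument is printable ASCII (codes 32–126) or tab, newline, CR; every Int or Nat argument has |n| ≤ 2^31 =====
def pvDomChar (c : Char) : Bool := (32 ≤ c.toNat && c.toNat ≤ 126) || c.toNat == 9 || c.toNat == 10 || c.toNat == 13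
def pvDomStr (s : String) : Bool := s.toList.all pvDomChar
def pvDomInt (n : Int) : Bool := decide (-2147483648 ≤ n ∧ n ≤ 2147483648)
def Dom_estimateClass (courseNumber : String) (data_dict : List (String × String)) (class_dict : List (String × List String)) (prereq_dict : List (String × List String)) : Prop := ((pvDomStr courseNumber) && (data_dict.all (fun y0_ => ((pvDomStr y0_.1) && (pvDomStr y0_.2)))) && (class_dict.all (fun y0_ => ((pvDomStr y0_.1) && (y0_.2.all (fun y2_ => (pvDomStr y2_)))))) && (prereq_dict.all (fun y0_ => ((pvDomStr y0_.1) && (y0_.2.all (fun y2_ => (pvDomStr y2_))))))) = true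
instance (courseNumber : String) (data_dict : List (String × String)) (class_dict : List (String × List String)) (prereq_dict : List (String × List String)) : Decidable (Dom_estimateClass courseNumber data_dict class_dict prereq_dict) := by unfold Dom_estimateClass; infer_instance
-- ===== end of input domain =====

-- B avoids sets entirely: candidates come from the first prerequisite roster (or the
-- flattened enrollment lists when there are none), then one sort + one dedup/filter scan
-- ('alternative', same cost).

-- ===== PORT A =====
def estimateClass (courseNumber : String) (data_dict : List (String × String)) (class_dict : List (String × List String)) (prereq_dict : List (String × List String)) : List String :=
  let ddD := PySem.Dict.ofList data_dict
  let cdD := PySem.Dict.ofList class_dict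
  let pdD := PySem.Dict.ofList prereq_dict
  if ddD.contains courseNumber then
    -- consolidated student list
    let s0 : PySem.Set String :=
      cdD.values.foldl (fun acc studentName => PySem.Set.union acc studentName) PySem.Set.empty
    -- remove students already enrolled (class_dict[courseNumber]; KeyError excluded by Pre_)
    let s1 : PySem.Set String := PySem.Set.diff s0 (cdD.getD courseNumber [])
    -- intersect with each prerequisite roster
    let s2 : PySem.Set String :=
      if pdD.contains courseNumber then
        (pdD.getD courseNumber []).foldl
          (fun acc prereq => PySem.Set.inter acc (cdD.getD prereq [])) s1
      else s1
    PySem.List.sorted s2 (fun x => x) false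
  else []

-- ===== PORT B =====
def estimateClass_alt (courseNumber : String) (data_dict : List (String × String)) (class_dict : List (String × List String)) (prereq_dict : List (String × List String)) : List String :=
  let ddD := PySem.Dict.ofList data_dict
  let cdD := PySem.Dict.ofList class_dict
  let pdD := PySem.Dict.ofList prereq_dict
  if !ddD.contains courseNumber then [] else
    let enrolled : List String := cdD.getD courseNumber []
    let prereqs : List String :=
      if pdD.contains courseNumber then pdD.getD courseNumber [] else []
    let rosters : List (List String) := prereqs.map (fun p => cdD.getD p [])
    -- (base, rest): candidate source and remaining prerequisite rosters
    let br : List String × List (List String) :=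
      match rosters with
      | b :: r => (b, r)
      | [] => (cdD.values.flatMap (fun r => r), [])
    -- one scan over the sorted candidates: dedup against prev + per-student membership test
    (((PySem.List.sorted br.1 (fun x => x) false).foldl
        (fun (st : List String × Option String) s =>
          ((if some s ≠ st.2 ∧ !enrolled.contains s ∧ br.2.all (fun r => r.contains s)
            then st.1 ++ [s] else st.1), some s))
        ([], none))).1

-- ===== PRECONDITION & SPEC =====
-- Pre_ excludes exactly the inputs where Python A raises KeyError: courseNumber present in
-- data_dict but missing from class_dict, or a listed prerequisite missing from class_dict.
def Pre_estimateClass (courseNumber : String) (data_dict : List (String × String)) (class_dict : List (String × List String)) (prereq_dict : List (String × List String)) : Prop :=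
  (PySem.Dict.ofList data_dict).contains courseNumber = true →
    ((PySem.Dict.ofList class_dict).contains courseNumber = true ∧
     ∀ p ∈ (PySem.Dict.ofList prereq_dict).getD courseNumber [],
       (PySem.Dict.ofList class_dict).contains p = true)
instance (courseNumber : String) (data_dict : List (String × String)) (class_dict : List (String × List String)) (prereq_dict : List (String × List String)) : Decidable (Pre_estimateClass courseNumber data_dict class_dict prereq_dict) := by unfold Pre_estimateClass; infer_instance

def pvWitness_estimateClass : String × (List (String × String)) × (List (String × List String)) × (List (String × List String)) :=
  ("cs101", [("cs101", "Intro")], [("cs101", ["amy", "bob"]), ("cs100", ["cal", "amy"])], [("cs101", ["cs100"])])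

def Spec_estimateClass (courseNumber : String) (data_dict : List (String × String)) (class_dict : List (String × List String)) (prereq_dict : List (String × List String)) (out : List String) : Prop := out = estimateClass_alt courseNumber data_dict class_dict prereq_dict
instance (courseNumber : String) (data_dict : List (String × String)) (class_dict : List (String × List String)) (prereq_dict : List (String × List String)) (out : List String) : Decidable (Spec_estimateClass courseNumber data_dict class_dict prereq_dict out) := by unfold Spec_estimateClass; infer_instance

-- ===== CLAIM =====
def Claim_equal_estimateClass : Prop := ∀ (courseNumber : String) (data_dict : List (String × String)) (class_dict : List (String × List String)) (prereq_dict : List (String × List String)), Dom_estimateClass courseNumber data_dict class_dict prereq_dict → Pre_estimateClass courseNumber data_dict class_dict prereq_dict → Spec_estimateClass courseNumber data_dict class_dict prereq_dict (estimateClass courseNumber data_dict class_dict prereq_dict)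

-- ===== LEMMAS AND PROOFS =====

-- The scan step of B's loop, abstracted over the per-student test P.
-- Accumulator form: the output list built so far just prefixes the rest of the scan.
lemma scan_acc (P : String → Prop) [DecidablePred P] :
    ∀ (t : List String) (out : List String) (pr : Option String),
      (t.foldl (fun (st : List String × Option String) s =>
          ((if some s ≠ st.2 ∧ P s then st.1 ++ [s] else st.1), some s)) (out, pr)).1
        = out ++ (t.foldl (fun (st : List String × Option String) s =>
          ((if some s ≠ st.2 ∧ P s then st.1 ++ [s] else st.1), some s)) ([], pr)).1 := by
  intro t
  induction t with
  | nil => intro out pr; simp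
  | cons s t ih =>
      intro out pr
      rw [List.foldl_cons, List.foldl_cons, ih, ih]
      split_ifs <;> simp [ih [s] (some s)]

-- Characterisation of B's scan over a weakly sorted list: the output is strictly
-- increasing and contains exactly the elements passing P (minus a clash with prev).
lemma scan_spec (P : String → Prop) [DecidablePred P] :
    ∀ (l : List String) (prev : Option String),
      l.Pairwise (· ≤ ·) → (∀ v, prev = some v → ∀ x ∈ l, v ≤ x) →
      ((l.foldl (fun (st : List String × Option String) s =>
          ((if some s ≠ st.2 ∧ P s then st.1 ++ [s] else st.1), some s)) ([], prev)).1.Pairwise (· < ·))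
      ∧ ∀ x, x ∈ (l.foldl (fun (st : List String × Option String) s =>
          ((if some s ≠ st.2 ∧ P s then st.1 ++ [s] else st.1), some s)) ([], prev)).1
          ↔ (x ∈ l ∧ P x ∧ some x ≠ prev) := by
  intro l
  induction l with
  | nil => intro prev _ _; simp
  | cons s t ih =>
      intro prev hpw hprev
      have hst : ∀ x ∈ t, s ≤ x := fun x hx => List.rel_of_pairwise_cons hpw hx
      have htpw : t.Pairwise (· ≤ ·) := hpw.of_cons
      obtain ⟨ihpw, ihmem⟩ := ih (some s) htpw
        (by intro v hv x hx; cases hv; exact hst x hx)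
      rw [List.foldl_cons, scan_acc]
      by_cases hc : some s ≠ prev ∧ P s
      · rw [if_pos hc]
        simp only [List.nil_append, List.singleton_append]
        constructor
        · refine List.pairwise_cons.2 ⟨?_, ihpw⟩
          intro y hy
          obtain ⟨hyt, _, hys⟩ := (ihmem y).1 hy
          exact lt_of_le_of_ne (hst y hyt) (fun h => hys (by rw [h]))
        · intro x
          rw [List.mem_cons, ihmem, List.mem_cons]
          constructor
          · rintro (rfl | ⟨hxt, hPx, _⟩)
            · exact ⟨Or.inl rfl, hc.2, hc.1⟩
            · refine ⟨Or.inr hxt, hPx, ?_⟩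
              intro hxp
              obtain ⟨v, rfl⟩ : ∃ v, prev = some v := ⟨x, hxp.symm⟩
              have hvx : x = v := by injection hxp
              have h1 : x ≤ s := by
                subst hvx; exact hprev x rfl s (List.mem_cons_self)
              have h2 : s ≤ x := hst x hxt
              have : x = s := le_antisymm h1 h2
              subst hvx
              exact hc.1 (by rw [this])
          · rintro ⟨(rfl | hxt), hPx, hxprev⟩
            · exact Or.inl rfl
            · by_cases hxs : x = s
              · exact Or.inl hxs
              · exact Or.inr ⟨hxt, hPx, fun h => hxs (by injection h)⟩
      · rw [if_neg hc]
        simp only [List.nil_append]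
        constructor
        · exact ihpw
        · intro x
          rw [ihmem, List.mem_cons]
          constructor
          · rintro ⟨hxt, hPx, hxs⟩
            refine ⟨Or.inr hxt, hPx, ?_⟩
            intro hxp
            obtain ⟨v, rfl⟩ : ∃ v, prev = some v := ⟨x, hxp.symm⟩
            have hvx : x = v := by injection hxp
            have h1 : x ≤ s := by
              subst hvx; exact hprev x rfl s (List.mem_cons_self)
            have h2 : s ≤ x := hst x hxt
            have : x = s := le_antisymm h1 h2
            exact hxs (by rw [this])
          · rintro ⟨(rfl | hxt), hPx, hxprev⟩
            · exact absurd ⟨hxprev, hPx⟩ hc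
            · refine ⟨hxt, hPx, ?_⟩
              intro h
              have hxs : x = s := by injection h
              subst hxs
              exact absurd ⟨hxprev, hPx⟩ hc

-- bridge: sorted(S) equals B's sort-dedup-filter scan over base, whenever S is the
-- duplicate-free list of base's elements passing P.
lemma bridge (S base : List String) (P : String → Prop) [DecidablePred P]
    (hS : S.Nodup) (hmem : ∀ x, x ∈ S ↔ x ∈ base ∧ P x) :
    PySem.List.sorted S (fun x => x) false
      = ((PySem.List.sorted base (fun x => x) false).foldl
          (fun (st : List String × Option String) s =>
            ((if some s ≠ st.2 ∧ P s then st.1 ++ [s] else st.1), some s)) ([], none)).1 := by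
  obtain ⟨hpw, hm⟩ := scan_spec P (PySem.List.sorted base (fun x => x) false) none
    (PySem.List.sorted_pairwise base (fun x => x)) (by intro v hv; cases hv)
  refine PySem.List.sorted_id_eq_of_perm_of_pairwise S _ ?_ (hpw.imp le_of_lt)
  refine (List.perm_ext_iff_of_nodup (hpw.imp ne_of_lt) hS).2 ?_
  intro x
  rw [hm x, hmem x, PySem.List.mem_sorted]
  simp

-- membership in A's consolidated union of all rosters
lemma mem_foldl_union (vs : List (List String)) (acc : PySem.Set String) (x : String) :
    x ∈ vs.foldl (fun a r => PySem.Set.union a r) acc ↔ x ∈ acc ∨ ∃ r ∈ vs, x ∈ r := by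
  induction vs generalizing acc with
  | nil => simp
  | cons v vs ih =>
      rw [List.foldl_cons, ih]
      simp only [PySem.Set.union, PySem.Set.mem_update, List.mem_cons]
      constructor
      · rintro ((h | h) | ⟨r, hr, hx⟩)
        · exact Or.inl h
        · exact Or.inr ⟨v, Or.inl rfl, h⟩
        · exact Or.inr ⟨r, Or.inr hr, hx⟩
      · rintro (h | ⟨r, (rfl | hr), hx⟩)
        · exact Or.inl (Or.inl h)
        · exact Or.inl (Or.inr hx)
        · exact Or.inr ⟨r, hr, hx⟩

lemma nodup_foldl_union (vs : List (List String)) (acc : PySem.Set String) (h : acc.Nodup) :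
    (vs.foldl (fun a r => PySem.Set.union a r) acc).Nodup := by
  induction vs generalizing acc with
  | nil => exact h
  | cons v vs ih => exact ih _ (PySem.Set.nodup_update acc v h)

-- Folding intersection over a list of rosters is one filter by membership in all of them.
lemma foldl_inter_eq_filter_all (rs : List (List String)) (s : PySem.Set String) :
    rs.foldl (fun acc r => PySem.Set.inter acc r) s
      = s.filter (fun x => rs.all (fun r => r.contains x)) := by
  induction rs generalizing s with
  | nil => simp
  | cons r rs ih =>
      rw [List.foldl_cons, ih]
      simp only [PySem.Set.inter, List.filter_filter, List.all_cons]
      exact List.filter_congr (fun x _ => by rw [Bool.and_comm, PySem.Set.contains_eq_listContains])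

-- a successful dict lookup is one of the dict's values
lemma getD_mem_values (d : PySem.Dict String (List String)) (k : String) (dflt : List String)
    (h : d.contains k = true) : d.getD k dflt ∈ d.values := by
  have h' : (d.items.find? (fun p => p.1 == k)).isSome := by
    rw [List.find?_isSome]
    simpa [PySem.Dict.contains, List.any_eq_true] using h
  obtain ⟨p, hp⟩ := Option.isSome_iff_exists.1 h'
  have hmem : p ∈ d.items := List.mem_of_find?_eq_some hp
  have : d.getD k dflt = p.2 := by simp [PySem.Dict.getD, PySem.Dict.get?, hp]
  rw [this]
  exact List.mem_map.2 ⟨p, hmem, rfl⟩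

theorem estimateClass_spec : Claim_equal_estimateClass := by
  intro c dd cd pd _dom pre
  unfold Spec_estimateClass estimateClass estimateClass_alt
  by_cases h : (PySem.Dict.ofList dd).contains c = true
  · obtain ⟨hcd, hps⟩ := pre h
    simp only [h, if_true, Bool.not_true, Bool.false_eq_true, if_false]
    by_cases hp : (PySem.Dict.ofList pd).contains c = true
    · simp only [hp, if_true]
      cases hpre : (PySem.Dict.ofList pd).getD c [] with
      | nil =>
          simp only [List.map_nil, List.foldl_nil]
          refine bridge _ _ _ ?_ ?_
          · exact (nodup_foldl_union _ _ List.nodup_nil).filter _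
          · intro x
            simp [PySem.Set.diff, mem_foldl_union, PySem.Set.empty]
      | cons q qs =>
          rw [hpre] at hps
          simp only [List.map_cons]
          rw [← List.foldl_map (f := fun p => (PySem.Dict.ofList cd).getD p [])
                (g := fun acc r => PySem.Set.inter acc r),
              foldl_inter_eq_filter_all]
          refine bridge _ _ _ ?_ ?_
          · exact ((nodup_foldl_union _ _ List.nodup_nil).filter _).filter _
          · intro x
            simp [PySem.Set.diff, mem_foldl_union, PySem.Set.empty]
            constructor
            · rintro ⟨-, ⟨hq, hall⟩, hen⟩
              exact ⟨hq, hen, hall⟩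
            · rintro ⟨hq, hen, hall⟩
              exact ⟨⟨(PySem.Dict.ofList cd).getD q [],
                getD_mem_values _ q [] (hps q List.mem_cons_self), hq⟩, ⟨hq, hall⟩, hen⟩
    · simp only [hp, Bool.false_eq_true, if_false]
      refine bridge _ _ _ ?_ ?_
      · exact (nodup_foldl_union _ _ List.nodup_nil).filter _
      · intro x
        simp [PySem.Set.diff, mem_foldl_union, PySem.Set.empty]
  · simp [h]
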